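-- pv_equiv track=rewrite | github.com/daniel-reich/ubiquitous-fiesta | bJxNHk7aovkx8Q776_4.py | gold_distribution
-- ===== SOURCE A (Python) =====
-- def gold_distribution(gold):
--     matt = []
--     mm = []
--     while gold != []:
--         if gold[0] > gold[-1]:
--             if len(matt) == len(mm):
--                 matt.append(gold[0])
--             else:
--                 mm.append(gold[0])
--             gold = gold[1:]
--         elif gold[-1] > gold[0]:
--             if len(matt) == len(mm):
--                 matt.append(gold[-1])
--             else:
--                 mm.append(gold[-1])
--             gold = gold[:-1]
--         else:
--             if len(matt) == len(mm):
--                 matt.append(gold[0])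
--             else:
--                 mm.append(gold[0])
--             gold = gold[1:]
--     return [sum(matt),sum(mm)]
-- ===== SOURCE B (Python) =====
-- def gold_distribution(gold):
--     # Two pointers over the original list: no slicing, O(n) instead of O(n^2).
--     i, j = 0, len(gold) - 1
--     s = [0, 0]
--     k = 0
--     while i <= j:
--         if gold[i] >= gold[j]:
--             s[k] += gold[i]
--             i += 1
--         else:
--             s[k] += gold[j]
--             j -= 1
--         k ^= 1
--     return s
-- ===== Notes on version B (the rewrite author's own statement) =====
-- stated objective: faster
-- what changed: Replaces the while-loop that rebuilds the list by slicing (gold[1:]/gold[:-1]) each step with two index pointers over the unmodified list, accumulating the two running sums directly with a parity flag instead of growing two lists and summing at the end.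
import Mathlib
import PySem

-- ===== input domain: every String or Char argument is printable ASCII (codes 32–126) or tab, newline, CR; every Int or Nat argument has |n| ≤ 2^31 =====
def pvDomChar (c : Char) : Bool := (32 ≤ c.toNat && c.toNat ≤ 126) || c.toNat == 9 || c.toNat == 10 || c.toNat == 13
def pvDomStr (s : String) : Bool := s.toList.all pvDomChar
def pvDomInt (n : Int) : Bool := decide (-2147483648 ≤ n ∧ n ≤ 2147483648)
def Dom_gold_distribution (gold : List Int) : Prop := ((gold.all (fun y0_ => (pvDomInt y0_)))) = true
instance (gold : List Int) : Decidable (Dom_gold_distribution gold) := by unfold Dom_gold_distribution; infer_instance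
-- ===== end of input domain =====

-- B replaces A's repeated list slicing by two index pointers with running sums (O(n) instead of O(n^2)); same return value.

-- ===== PORT A =====
-- the while loop of A: state (gold, matt, mm); returns the final (matt, mm)
def goldLoopA (g matt mm : List Int) : List Int × List Int :=
  match g with
  | [] => (matt, mm)
  | x :: xs =>
    -- gold[0] is pyGetD (x::xs) 0 0, gold[-1] is pyGetD (x::xs) (-1) 0;
    -- the loop guard makes IndexError impossible, so pyGetD is exact
    if PySem.List.pyGetD (x :: xs) (-1) 0 < PySem.List.pyGetD (x :: xs) 0 0 then  -- gold[0] > gold[-1]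
      if matt.length == mm.length then
        goldLoopA (PySem.List.slice (x :: xs) (some 1) none) (matt ++ [PySem.List.pyGetD (x :: xs) 0 0]) mm
      else
        goldLoopA (PySem.List.slice (x :: xs) (some 1) none) matt (mm ++ [PySem.List.pyGetD (x :: xs) 0 0])
    else if PySem.List.pyGetD (x :: xs) 0 0 < PySem.List.pyGetD (x :: xs) (-1) 0 then  -- gold[-1] > gold[0]
      if matt.length == mm.length then
        goldLoopA (PySem.List.slice (x :: xs) none (some (-1))) (matt ++ [PySem.List.pyGetD (x :: xs) (-1) 0]) mm
      else
        goldLoopA (PySem.List.slice (x :: xs) none (some (-1))) matt (mm ++ [PySem.List.pyGetD (x :: xs) (-1) 0])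
    else
      if matt.length == mm.length then
        goldLoopA (PySem.List.slice (x :: xs) (some 1) none) (matt ++ [PySem.List.pyGetD (x :: xs) 0 0]) mm
      else
        goldLoopA (PySem.List.slice (x :: xs) (some 1) none) matt (mm ++ [PySem.List.pyGetD (x :: xs) 0 0])
termination_by g.length
decreasing_by
  all_goals simp [PySem.List.slice_from_one, PySem.List.slice_to_neg_one]

def gold_distribution (gold : List Int) : List Int :=
  let p := goldLoopA gold [] []
  [p.1.sum, p.2.sum]

-- ===== PORT B =====
-- the while loop of B: i, j Int pointers; k : Bool is "k == 0" (add to s0)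
def goldLoopB (gold : List Int) (i j s0 s1 : Int) (k : Bool) : Int × Int :=
  if _h : i ≤ j then
    -- gold[i] is (pyGet? gold i).getD 0, gold[j] is (pyGet? gold j).getD 0:
    -- the indices stay in range while i ≤ j, so the default is never used
    if (PySem.List.pyGet? gold j).getD 0 ≤ (PySem.List.pyGet? gold i).getD 0 then  -- gold[i] >= gold[j]
      if k then goldLoopB gold (i + 1) j (s0 + (PySem.List.pyGet? gold i).getD 0) s1 false
      else goldLoopB gold (i + 1) j s0 (s1 + (PySem.List.pyGet? gold i).getD 0) true
    else
      if k then goldLoopB gold i (j - 1) (s0 + (PySem.List.pyGet? gold j).getD 0) s1 false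
      else goldLoopB gold i (j - 1) s0 (s1 + (PySem.List.pyGet? gold j).getD 0) true
  else (s0, s1)
termination_by (j + 1 - i).toNat
decreasing_by all_goals omega

def gold_distribution_alt (gold : List Int) : List Int :=
  let p := goldLoopB gold 0 ((gold.length : Int) - 1) 0 0 true
  [p.1, p.2]

-- ===== PRECONDITION & SPEC =====
def Spec_gold_distribution (gold : List Int) (out : List Int) : Prop := out = gold_distribution_alt gold
instance (gold : List Int) (out : List Int) : Decidable (Spec_gold_distribution gold out) := by unfold Spec_gold_distribution; infer_instance

-- ===== CLAIM (what is proved, stated in full; the proofs are below) =====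
def Claim_equal_gold_distribution : Prop := ∀ (gold : List Int), Dom_gold_distribution gold → Spec_gold_distribution gold (gold_distribution gold)

-- ===== LEMMAS AND PROOFS =====

lemma sum_append_singleton (l : List Int) (x : Int) : (l ++ [x]).sum = l.sum + x := by
  simp

lemma key (gold : List Int) :
    ∀ (n i : Nat) (matt mm : List Int),
      i + n ≤ gold.length →
      (matt.length = mm.length ∨ matt.length = mm.length + 1) →
      ((goldLoopA ((gold.drop i).take n) matt mm).1.sum,
       (goldLoopA ((gold.drop i).take n) matt mm).2.sum)
        = goldLoopB gold (i : Int) ((i : Int) + (n : Int) - 1) matt.sum mm.sum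
            (matt.length == mm.length) := by
  intro n
  induction n with
  | zero =>
    intro i matt mm _ _
    rw [goldLoopB]
    rw [dif_neg (by push_cast; omega)]
    simp [goldLoopA]
  | succ n ih =>
    intro i matt mm hle hinv
    have hi : i < gold.length := by omega
    have hin : i + n < gold.length := by omega
    have hseg : (gold.drop i).take (n + 1)
        = gold[i] :: ((gold.drop (i + 1)).take n) := by
      rw [List.drop_eq_getElem_cons hi, List.take_succ_cons]
    have hlen : ((gold.drop i).take (n + 1)).length = n + 1 := by
      simp; omega
    have ej : (i : Int) + ((n + 1 : Nat) : Int) - 1 = ((i + n : Nat) : Int) := by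
      push_cast; ring
    -- the two end values, in the form B reads them
    have haB : (PySem.List.pyGet? gold (i : Int)).getD 0 = gold[i] := by
      simp [PySem.List.pyGet?_natCast, List.getElem?_eq_getElem hi]
    have hbB : (PySem.List.pyGet? gold ((i : Int) + ((n + 1 : Nat) : Int) - 1)).getD 0
        = gold[i + n] := by
      rw [ej, PySem.List.pyGet?_natCast, List.getElem?_eq_getElem hin]; rfl
    -- A reads the same two values at the ends of the current segment
    have hhead : PySem.List.pyGetD ((gold.drop i).take (n + 1)) 0 0
        = (PySem.List.pyGet? gold (i : Int)).getD 0 := by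
      rw [hseg, PySem.List.pyGetD_zero_cons, haB]
    have hlast : PySem.List.pyGetD ((gold.drop i).take (n + 1)) (-1) 0
        = (PySem.List.pyGet? gold ((i : Int) + ((n + 1 : Nat) : Int) - 1)).getD 0 := by
      rw [PySem.List.pyGetD_neg_ofNat _ 1 0 (by omega) (by omega), hbB]
      simp only [hlen, Nat.add_sub_cancel]
      rw [List.getElem_take, List.getElem_drop]
    -- the segment shrunk from the front / from the back
    have htail : PySem.List.slice ((gold.drop i).take (n + 1)) (some 1) none
        = (gold.drop (i + 1)).take n := by
      rw [PySem.List.slice_from_one, hseg, List.tail_cons]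
    have hdropLast : PySem.List.slice ((gold.drop i).take (n + 1)) none (some (-1))
        = (gold.drop i).take n := by
      rw [PySem.List.slice_to_neg_one, List.dropLast_eq_take, hlen, Nat.add_sub_cancel,
        List.take_take]
      simp
    -- unfold one step of each loop
    conv_lhs => rw [hseg, goldLoopA]
    simp only [← hseg]
    rw [hlast, hhead, htail, hdropLast]
    rw [goldLoopB, dif_pos (by push_cast; omega)]
    set aV := (PySem.List.pyGet? gold (i : Int)).getD 0 with haV
    set bV := (PySem.List.pyGet? gold ((i : Int) + ((n + 1 : Nat) : Int) - 1)).getD 0 with hbV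
    have ei : ((i + 1 : Nat) : Int) = (i : Int) + 1 := by push_cast; ring
    have ef : ((i + 1 : Nat) : Int) + (n : Int) - 1 = (i : Int) + ((n + 1 : Nat) : Int) - 1 := by
      push_cast; ring
    have eb : (i : Int) + (n : Int) - 1 = (i : Int) + ((n + 1 : Nat) : Int) - 1 - 1 := by
      push_cast; ring
    by_cases hc1 : bV < aV
    · -- the front end is strictly larger: both take gold[i]
      rw [if_pos hc1, if_pos (le_of_lt hc1)]
      by_cases hk : matt.length = mm.length
      · rw [if_pos (by simpa using hk), if_pos (by simpa using hk)]
        have h2 := ih (i + 1) (matt ++ [aV]) mm (by omega) (by simp; omega)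
        rw [ef, ei, sum_append_singleton, show ((matt ++ [aV]).length == mm.length) = false
          from by simp [hk]] at h2
        exact h2
      · rw [if_neg (by simpa using hk), if_neg (by simpa using hk)]
        have hlen1 : matt.length = mm.length + 1 := by tauto
        have h2 := ih (i + 1) matt (mm ++ [aV]) (by omega) (by simp; omega)
        rw [ef, ei, sum_append_singleton, show (matt.length == (mm ++ [aV]).length) = true
          from by simp [hlen1]] at h2
        exact h2
    · rw [if_neg hc1]
      by_cases hc2 : aV < bV
      · -- the back end is strictly larger: both take gold[j]
        rw [if_pos hc2, if_neg (show ¬(bV ≤ aV) by omega)]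
        by_cases hk : matt.length = mm.length
        · rw [if_pos (by simpa using hk), if_pos (by simpa using hk)]
          have h2 := ih i (matt ++ [bV]) mm (by omega) (by simp; omega)
          rw [eb, sum_append_singleton, show ((matt ++ [bV]).length == mm.length) = false
            from by simp [hk]] at h2
          exact h2
        · rw [if_neg (by simpa using hk), if_neg (by simpa using hk)]
          have hlen1 : matt.length = mm.length + 1 := by tauto
          have h2 := ih i matt (mm ++ [bV]) (by omega) (by simp; omega)
          rw [eb, sum_append_singleton, show (matt.length == (mm ++ [bV]).length) = true
            from by simp [hlen1]] at h2
          exact h2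
      · -- equal ends: A takes the front; B's gold[i] >= gold[j] also takes the front
        rw [if_neg hc2, if_pos (show bV ≤ aV by omega)]
        by_cases hk : matt.length = mm.length
        · rw [if_pos (by simpa using hk), if_pos (by simpa using hk)]
          have h2 := ih (i + 1) (matt ++ [aV]) mm (by omega) (by simp; omega)
          rw [ef, ei, sum_append_singleton, show ((matt ++ [aV]).length == mm.length) = false
            from by simp [hk]] at h2
          exact h2
        · rw [if_neg (by simpa using hk), if_neg (by simpa using hk)]
          have hlen1 : matt.length = mm.length + 1 := by tauto
          have h2 := ih (i + 1) matt (mm ++ [aV]) (by omega) (by simp; omega)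
          rw [ef, ei, sum_append_singleton, show (matt.length == (mm ++ [aV]).length) = true
            from by simp [hlen1]] at h2
          exact h2

-- ===== VERDICT (by name: the statement is the Claim_ definition above) =====
theorem gold_distribution_spec : Claim_equal_gold_distribution := by
  intro gold _
  unfold Spec_gold_distribution gold_distribution gold_distribution_alt
  have h := key gold gold.length 0 [] [] (by omega) (Or.inl rfl)
  simp at h
  rw [Prod.ext_iff] at h
  simp only [List.cons.injEq, and_true]
  exact ⟨by simpa using h.1, by simpa using h.2⟩
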